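-- pv_equiv track=rewrite | github.com/Tammon23/CSSAdventOfCode | 2025/Day 1/Dec1_P2.py | solve
-- ===== SOURCE A (Python) =====
-- from typing import Any, Iterable
--
-- def solve(data: Iterable[int]) -> Any:
--     current = 50
--     ans = 0
--
--     for number in data:
--         op = 1 if number > 0 else -1
--
--         for i in range(abs(number)):
--             current += op
--             if current in [0, 100]:
--                 ans += 1
--
--             current %= 100
--
--     return ans
-- ===== SOURCE B (Python) =====
-- def solve(data):
--     # O(len(data)): per number, count boundary crossings arithmetically instead of unit-stepping.
--     current = 50
--     ans = 0
--     for n in data: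
--         if n >= 0:
--             ans += (current + n) // 100
--             current = (current + n) % 100
--         else:
--             m = -n
--             i0 = current if current != 0 else 100
--             if i0 <= m:
--                 ans += (m - i0) // 100 + 1
--             current = (current - m) % 100
--     return ans
-- ===== Notes on version B (the rewrite author's own statement) =====
-- stated objective: faster
-- what changed: Per number, B computes the count of 0/100-boundary crossings with one integer division and updates the position with one mod, instead of A's inner loop stepping the position one unit at a time.
import Mathlib
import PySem

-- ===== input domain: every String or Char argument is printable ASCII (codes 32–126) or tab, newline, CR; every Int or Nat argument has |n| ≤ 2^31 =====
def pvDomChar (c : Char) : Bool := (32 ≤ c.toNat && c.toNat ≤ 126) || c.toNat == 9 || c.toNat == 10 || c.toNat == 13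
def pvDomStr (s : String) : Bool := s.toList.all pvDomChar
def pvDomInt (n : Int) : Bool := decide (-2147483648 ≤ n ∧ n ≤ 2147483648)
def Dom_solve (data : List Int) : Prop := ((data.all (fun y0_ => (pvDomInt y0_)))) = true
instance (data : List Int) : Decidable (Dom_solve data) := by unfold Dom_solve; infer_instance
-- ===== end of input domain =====

-- B replaces A's per-unit stepping of the counter by one division-based crossing count per number (faster, asymptotic).

-- ===== PORT A =====
-- inner loop body of A: current += op; if current in [0, 100]: ans += 1; current %= 100
def innerA (op : Int) (st : Int × Int) (_i : Int) : Int × Int :=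
  let current := st.1 + op
  let ans := if current = 0 ∨ current = 100 then st.2 + 1 else st.2
  (PySem.Int.mod current 100, ans)

-- body of A's outer loop over the numbers
def stepA (st : Int × Int) (number : Int) : Int × Int :=
  let op : Int := if number > 0 then 1 else -1
  (PySem.List.pyRange 0 (number.natAbs : Int) 1).foldl (innerA op) st

def solve (data : List Int) : Int :=
  (data.foldl stepA (50, 0)).2

-- ===== PORT B =====
-- body of B's single loop: crossings of the 0/100 boundary counted by integer division
def stepB (st : Int × Int) (n : Int) : Int × Int :=
  if n ≥ 0 then
    (PySem.Int.mod (st.1 + n) 100, st.2 + PySem.Int.floordiv (st.1 + n) 100)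
  else
    let m := -n
    let i0 := if st.1 ≠ 0 then st.1 else (100 : Int)
    (PySem.Int.mod (st.1 - m) 100,
     if i0 ≤ m then st.2 + PySem.Int.floordiv (m - i0) 100 + 1 else st.2)

def solve_alt (data : List Int) : Int :=
  (data.foldl stepB (50, 0)).2

-- ===== PRECONDITION & SPEC =====
def Spec_solve (data : List Int) (out : Int) : Prop := out = solve_alt data
instance (data : List Int) (out : Int) : Decidable (Spec_solve data out) := by unfold Spec_solve; infer_instance

-- ===== CLAIM (what is proved, stated in full; the proofs are below) =====
def Claim_equal_solve : Prop := ∀ (data : List Int), Dom_solve data → Spec_solve data (solve data)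

-- ===== LEMMAS AND PROOFS =====

-- A's inner loop, going up by 1 for m steps from counter c: counts multiples of 100 crossed.
lemma innerUp_fold (m : Nat) : ∀ (c a : Int), 0 ≤ c → c < 100 →
    (PySem.List.pyRange 0 (m : Int) 1).foldl (innerA 1) (c, a)
      = ((c + m) % 100, a + (c + m) / 100) := by
  induction m with
  | zero =>
    intro c a h0 h1
    rw [PySem.List.pyRange_one_eq_nil (by omega)]
    simp only [List.foldl_nil, Prod.mk.injEq]
    constructor <;> omega
  | succ m ih =>
    intro c a h0 h1
    have hc : ((m + 1 : Nat) : Int) = (m : Int) + 1 := by push_cast; ring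
    rw [hc, PySem.List.pyRange_one_succ_right (by omega), List.foldl_append, ih c a h0 h1]
    simp only [List.foldl_cons, List.foldl_nil, innerA,
      PySem.Int.mod_eq_emod_of_pos (by norm_num : (0:Int) < 100)]
    refine Prod.ext ?_ ?_ <;> simp only <;>
      first
      | (split_ifs <;> omega)
      | omega

-- A's inner loop, going down by 1 for m steps from counter c.
lemma innerDown_fold (m : Nat) : ∀ (c a : Int), 0 ≤ c → c < 100 →
    (PySem.List.pyRange 0 (m : Int) 1).foldl (innerA (-1)) (c, a)
      = ((c - m) % 100, a + ((m : Int) + 100 - (if c = 0 then 100 else c)) / 100) := by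
  induction m with
  | zero =>
    intro c a h0 h1
    rw [PySem.List.pyRange_one_eq_nil (by omega)]
    simp only [List.foldl_nil, Prod.mk.injEq]
    constructor <;> [omega; (split_ifs <;> omega)]
  | succ m ih =>
    intro c a h0 h1
    have hc : ((m + 1 : Nat) : Int) = (m : Int) + 1 := by push_cast; ring
    rw [hc, PySem.List.pyRange_one_succ_right (by omega), List.foldl_append, ih c a h0 h1]
    simp only [List.foldl_cons, List.foldl_nil, innerA,
      PySem.Int.mod_eq_emod_of_pos (by norm_num : (0:Int) < 100)]
    refine Prod.ext ?_ ?_ <;> simp only <;>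
      first
      | (split_ifs <;> omega)
      | omega

lemma stepB_fst_bounds (st : Int × Int) (n : Int) :
    0 ≤ (stepB st n).1 ∧ (stepB st n).1 < 100 := by
  unfold stepB
  split_ifs <;> dsimp only <;>
    exact ⟨PySem.Int.mod_nonneg _ (by norm_num), PySem.Int.mod_lt _ (by norm_num)⟩

lemma stepA_eq_stepB (c a n : Int) (h0 : 0 ≤ c) (h1 : c < 100) :
    stepA (c, a) n = stepB (c, a) n := by
  unfold stepA stepB
  by_cases hn : n > 0
  · have habs : (n.natAbs : Int) = n := by omega
    rw [if_pos hn, if_pos (by omega : n ≥ 0), innerUp_fold n.natAbs c a h0 h1, habs,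
      PySem.Int.mod_eq_emod_of_pos (by norm_num), PySem.Int.floordiv_eq_ediv_of_pos (by norm_num)]
  · by_cases hz : n = 0
    · subst hz
      simp only [Int.natAbs_zero, Nat.cast_zero, PySem.List.pyRange_one_eq_nil (by omega : (0:Int) ≤ 0),
        List.foldl_nil, if_pos (by omega : (0:Int) ≥ 0),
        PySem.Int.mod_eq_emod_of_pos (by norm_num : (0:Int) < 100),
        PySem.Int.floordiv_eq_ediv_of_pos (by norm_num : (0:Int) < 100)]
      refine Prod.ext ?_ ?_ <;> simp only <;> omega
    · have habs : (n.natAbs : Int) = -n := by omega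
      rw [if_neg hn, if_neg (by omega : ¬ n ≥ 0), innerDown_fold n.natAbs c a h0 h1, habs]
      simp only [PySem.Int.mod_eq_emod_of_pos (by norm_num : (0:Int) < 100),
        PySem.Int.floordiv_eq_ediv_of_pos (by norm_num : (0:Int) < 100)]
      apply Prod.ext <;> dsimp only
      all_goals split_ifs <;> omega

lemma fold_eq (data : List Int) : ∀ (c a : Int), 0 ≤ c → c < 100 →
    data.foldl stepA (c, a) = data.foldl stepB (c, a) := by
  induction data with
  | nil => intro c a _ _; rfl
  | cons n t ih =>
    intro c a h0 h1
    simp only [List.foldl_cons]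
    rw [stepA_eq_stepB c a n h0 h1]
    have hb := stepB_fst_bounds (c, a) n
    rcases h : stepB (c, a) n with ⟨c', a'⟩
    rw [h] at hb
    exact ih c' a' hb.1 hb.2

-- ===== VERDICT (by name: the statement is the Claim_ definition above) =====
theorem solve_spec : Claim_equal_solve := by
  intro data _
  unfold Spec_solve solve solve_alt
  rw [fold_eq data 50 0 (by norm_num) (by norm_num)]
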